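-- pv_equiv track=rewrite | github.com/pypi-data/pypi-code-22 | tfcoreml/tfcoreml-0.1.0-py2.7-none-any.whl/_layers.py | _get_broadcasted_shape4
-- ===== SOURCE A (Python) =====
-- def _get_broadcasted_shape4(shapes):
--   broadcasted_shape = [1, 1, 1, 1]
--   for shape in shapes:
--     rank = len(shape)
--     shape4 = [1] * (4 - rank) + shape
--     broadcasted_shape = [max(shape4[i], broadcasted_shape[i]) for i in \
--         range(len(broadcasted_shape))]
--   return broadcasted_shape
-- ===== SOURCE B (Python) =====
-- def _get_broadcasted_shape4(shapes):
--   rows = [([1] * (4 - len(shape)) + shape)[:4] for shape in shapes]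
--   return [max([1] + [row[i] for row in rows]) for i in range(4)]
-- ===== Notes on version B (the rewrite author's own statement) =====
-- stated objective: alternative
-- what changed: Replaces the running-accumulator fold over shapes (rebuilding the 4-list after each shape) by padding every shape to a 4-row once and then computing each of the 4 output positions as an independent column-wise max with 1 included.
import Mathlib
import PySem

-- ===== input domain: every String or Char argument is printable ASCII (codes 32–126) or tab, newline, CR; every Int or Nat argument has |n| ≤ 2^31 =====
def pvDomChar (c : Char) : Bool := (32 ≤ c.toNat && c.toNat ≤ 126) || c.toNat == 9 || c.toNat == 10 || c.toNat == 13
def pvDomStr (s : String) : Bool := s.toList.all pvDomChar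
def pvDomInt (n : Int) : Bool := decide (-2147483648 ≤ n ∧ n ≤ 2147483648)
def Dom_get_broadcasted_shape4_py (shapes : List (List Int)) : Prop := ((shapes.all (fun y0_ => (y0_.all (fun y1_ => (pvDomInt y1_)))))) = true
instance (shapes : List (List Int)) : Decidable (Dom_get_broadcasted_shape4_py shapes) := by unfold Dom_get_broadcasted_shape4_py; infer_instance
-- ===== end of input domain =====

-- B computes the broadcasted 4D shape column-wise over once-padded rows instead of A's running-accumulator fold; alternative decomposition, same cost.


-- ===== PORT A =====
-- A: fold over shapes; each step pads the shape on the left with 1s to rank 4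
-- (Python [1]*(4-rank) is [] for rank > 4) and takes the elementwise max with the
-- accumulator over range(len(acc)).  The index i is always < shape4.length, so
-- getD's default is never used (it stands for Python's always-in-range shape4[i]).
def get_broadcasted_shape4_py (shapes : List (List Int)) : List Int :=
  shapes.foldl (fun acc shape =>
    let shape4 := List.replicate (4 - shape.length) 1 ++ shape
    (List.range acc.length).map (fun i => max (shape4.getD i 1) (acc.getD i 1)))
  [1, 1, 1, 1]

-- ===== PORT B =====
-- B: pad every shape to exactly 4 entries once, then each output position is the
-- max of 1 and that column of the padded rows.
def get_broadcasted_shape4_py_alt (shapes : List (List Int)) : List Int :=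
  let rows := shapes.map (fun shape => (List.replicate (4 - shape.length) 1 ++ shape).take 4)
  (List.range 4).map (fun i => (rows.map (fun row => row.getD i 1)).foldl max 1)

-- ===== PRECONDITION & SPEC =====
def Spec_get_broadcasted_shape4_py (shapes : List (List Int)) (out : List Int) : Prop := out = get_broadcasted_shape4_py_alt shapes
instance (shapes : List (List Int)) (out : List Int) : Decidable (Spec_get_broadcasted_shape4_py shapes out) := by unfold Spec_get_broadcasted_shape4_py; infer_instance

-- ===== CLAIM (what is proved, stated in full; the proofs are below) =====
def Claim_equal_get_broadcasted_shape4_py : Prop := ∀ (shapes : List (List Int)), Dom_get_broadcasted_shape4_py shapes → Spec_get_broadcasted_shape4_py shapes (get_broadcasted_shape4_py shapes)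

-- ===== LEMMAS AND PROOFS =====

-- getD through take 4 at an index < 4 is getD of the original list
lemma getD_take4 (l : List Int) (i : Nat) (hi : i < 4) : (l.take 4).getD i 1 = l.getD i 1 := by
  simp [List.getD, hi]

-- the A-side fold, from any accumulator of length 4, is the column-wise max fold
lemma fold_eq (shapes : List (List Int)) :
    ∀ (acc : List Int), acc.length = 4 →
    shapes.foldl (fun acc shape =>
      let shape4 := List.replicate (4 - shape.length) 1 ++ shape
      (List.range acc.length).map (fun i => max (shape4.getD i 1) (acc.getD i 1))) acc
    = (List.range 4).map (fun i =>
        (shapes.map (fun shape =>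
          ((List.replicate (4 - shape.length) 1 ++ shape).take 4).getD i 1)).foldl max (acc.getD i 1)) := by
  induction shapes with
  | nil =>
    intro acc h
    simp only [List.foldl_nil, List.map_nil]
    apply List.ext_getElem
    · simp [h]
    · intro i hi _
      simp [h] at hi
      simp [List.getD, hi, h]
  | cons s ss ih =>
    intro acc h
    simp only [List.foldl_cons, List.map_cons]
    rw [ih _ (by simp [h])]
    apply List.map_congr_left
    intro i hi
    have hi4 : i < 4 := List.mem_range.mp hi
    have hacc : ((List.range acc.length).map (fun i =>
        max ((List.replicate (4 - s.length) 1 ++ s).getD i 1) (acc.getD i 1))).getD i 1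
        = max ((List.replicate (4 - s.length) 1 ++ s).getD i 1) (acc.getD i 1) := by
      simp [List.getD, h, hi4]
    rw [hacc, getD_take4 _ _ hi4, max_comm]

lemma getD_ones (i : Nat) : ([1, 1, 1, 1] : List Int).getD i 1 = 1 := by
  match i with
  | 0 => rfl
  | 1 => rfl
  | 2 => rfl
  | 3 => rfl
  | n + 4 => simp [List.getD]

-- ===== VERDICT (by name: the statement is the Claim_ definition above) =====
theorem get_broadcasted_shape4_py_spec : Claim_equal_get_broadcasted_shape4_py := by
  intro shapes _
  unfold Spec_get_broadcasted_shape4_py get_broadcasted_shape4_py get_broadcasted_shape4_py_alt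
  rw [fold_eq shapes [1, 1, 1, 1] rfl]
  simp only [List.map_map, getD_ones, Function.comp_def]
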